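-- pv_equiv track=rewrite | github.com/m13253/wifijam | scapy/wifijam.py | get_string_length_with_limit
-- ===== SOURCE A (Python) =====
-- def get_string_length_with_limit(s, limit=32):
--     byte_len = 0
--     rune_len = 0
--     while byte_len <= limit:
--         if byte_len == len(s):
--             return byte_len
--         if s[byte_len] & 0xc0 != 0x80:
--             rune_len = byte_len
--         byte_len += 1
--     return rune_len
-- ===== SOURCE B (Python) =====
-- def get_string_length_with_limit(s, limit=32):
--     n = len(s)
--     if n <= limit:
--         return n
--     for p in range(limit, -1, -1):
--         if s[p] & 0xc0 != 0x80:
--             return p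
--     return 0
-- ===== Notes on version B (the rewrite author's own statement) =====
-- stated objective: idiomatic
-- what changed: Replaces A's forward scan that tracks the last rune boundary with an early full-length return plus a backward first-hit search from the limit for the nearest rune boundary.
import Mathlib
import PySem

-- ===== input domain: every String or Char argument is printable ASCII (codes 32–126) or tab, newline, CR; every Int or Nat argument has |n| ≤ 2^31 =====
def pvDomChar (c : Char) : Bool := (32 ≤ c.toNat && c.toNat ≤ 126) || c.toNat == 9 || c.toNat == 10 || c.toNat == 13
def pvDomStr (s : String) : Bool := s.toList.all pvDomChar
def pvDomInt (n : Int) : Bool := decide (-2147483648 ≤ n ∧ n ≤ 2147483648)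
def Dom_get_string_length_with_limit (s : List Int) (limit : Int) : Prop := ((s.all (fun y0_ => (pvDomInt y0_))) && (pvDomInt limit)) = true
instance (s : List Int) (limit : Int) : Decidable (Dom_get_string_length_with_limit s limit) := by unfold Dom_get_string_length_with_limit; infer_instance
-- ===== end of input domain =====

-- B replaces A's forward scan (tracking the last rune boundary seen) with an early
-- full-length return plus a backward first-hit search from the limit (objective: idiomatic).

-- ===== PORT A =====
-- A's while loop with mutable byte_len/rune_len, step for step.
def pvGoA (s : List Int) (limit byte_len rune_len : Int) : Int :=
  if byte_len ≤ limit then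
    if byte_len = (s.length : Int) then byte_len
    else
      pvGoA s limit (byte_len + 1)
        (if PySem.Int.band ((PySem.List.pyGet? s byte_len).getD 0) 0xc0 ≠ 0x80 then byte_len
         else rune_len)
  else rune_len
termination_by (limit + 1 - byte_len).toNat
decreasing_by omega

def get_string_length_with_limit (s : List Int) (limit : Int) : Int :=
  pvGoA s limit 0 0

-- ===== PORT B =====
-- B's 'for p in range(limit, -1, -1)' loop with early return; falls off to 0 at p < 0.
def pvGoB (s : List Int) (p : Int) : Int :=
  if p < 0 then 0
  else if PySem.Int.band ((PySem.List.pyGet? s p).getD 0) 0xc0 ≠ 0x80 then p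
  else pvGoB s (p - 1)
termination_by (p + 1).toNat
decreasing_by omega

def get_string_length_with_limit_alt (s : List Int) (limit : Int) : Int :=
  let n : Int := s.length
  if n ≤ limit then n
  else pvGoB s limit

-- ===== PRECONDITION & SPEC =====
def Spec_get_string_length_with_limit (s : List Int) (limit : Int) (out : Int) : Prop := out = get_string_length_with_limit_alt s limit
instance (s : List Int) (limit : Int) (out : Int) : Decidable (Spec_get_string_length_with_limit s limit out) := by unfold Spec_get_string_length_with_limit; infer_instance

-- ===== CLAIM (what is proved, stated in full; the proofs are below) =====
def Claim_equal_get_string_length_with_limit : Prop := ∀ (s : List Int) (limit : Int), Dom_get_string_length_with_limit s limit → Spec_get_string_length_with_limit s limit (get_string_length_with_limit s limit)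

-- ===== LEMMAS AND PROOFS =====

-- Backward scan over [b, p] with fallback r (generalisation of pvGoB for the proof).
def pvGoB2 (s : List Int) (b p r : Int) : Int :=
  if p < b then r
  else if PySem.Int.band ((PySem.List.pyGet? s p).getD 0) 0xc0 ≠ 0x80 then p
  else pvGoB2 s b (p - 1) r
termination_by (p + 1 - b).toNat
decreasing_by omega

theorem pvGoB_eq_goB2 (s : List Int) (p : Int) : pvGoB s p = pvGoB2 s 0 p 0 := by
  rw [pvGoB, pvGoB2]
  split_ifs with h1 h2
  · rfl
  · rfl
  · exact pvGoB_eq_goB2 s (p - 1)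
termination_by (p + 1).toNat
decreasing_by omega

-- Folding the lowest position b of the backward scan into the fallback.
theorem pvGoB2_shift (s : List Int) (b p r : Int) (h : b ≤ p) :
    pvGoB2 s b p r =
      pvGoB2 s (b + 1) p
        (if PySem.Int.band ((PySem.List.pyGet? s b).getD 0) 0xc0 ≠ 0x80 then b else r) := by
  by_cases hpb : p = b
  · subst hpb
    rw [pvGoB2]
    rw [if_neg (by omega)]
    split_ifs with hs
    · rw [pvGoB2, if_pos (by omega)]
    · rw [pvGoB2, if_pos (by omega), pvGoB2, if_pos (by omega)]
  · rw [pvGoB2]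
    rw [if_neg (by omega)]
    conv_rhs => rw [pvGoB2, if_neg (by omega)]
    by_cases hs : PySem.Int.band ((PySem.List.pyGet? s p).getD 0) 0xc0 ≠ 0x80
    · rw [if_pos hs, if_pos hs]
    · rw [if_neg hs, if_neg hs]
      exact pvGoB2_shift s b (p - 1) r (by omega)
termination_by (p - b).toNat
decreasing_by omega

-- Case limit < len s: A's forward pass from b equals the backward scan of [b, limit].
theorem pvGoA_eq_goB2 (s : List Int) (limit b r : Int) (hn : limit < (s.length : Int)) :
    pvGoA s limit b r = pvGoB2 s b limit r := by
  by_cases hb : b ≤ limit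
  · rw [pvGoA, if_pos hb, if_neg (by omega),
        pvGoA_eq_goB2 s limit (b + 1) _ hn, ← pvGoB2_shift s b limit r hb]
  · rw [pvGoA, if_neg hb, pvGoB2, if_pos (by omega)]
termination_by (limit + 1 - b).toNat
decreasing_by omega

-- Case len s ≤ limit: A's loop runs to the end of the string and returns its length.
theorem pvGoA_full (s : List Int) (limit b r : Int) (hb : b ≤ (s.length : Int))
    (hl : (s.length : Int) ≤ limit) : pvGoA s limit b r = (s.length : Int) := by
  by_cases he : b = (s.length : Int)
  · rw [pvGoA, if_pos (by omega), if_pos he, he]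
  · rw [pvGoA, if_pos (by omega), if_neg he]
    exact pvGoA_full s limit (b + 1) _ (by omega) hl
termination_by ((s.length : Int) - b).toNat
decreasing_by omega

-- ===== VERDICT (by name: the statement is the Claim_ definition above) =====
theorem get_string_length_with_limit_spec : Claim_equal_get_string_length_with_limit := by
  intro s limit _
  unfold Spec_get_string_length_with_limit get_string_length_with_limit get_string_length_with_limit_alt
  by_cases h : (s.length : Int) ≤ limit
  · rw [if_pos h]
    exact pvGoA_full s limit 0 0 (by positivity) h
  · rw [if_neg h, pvGoA_eq_goB2 s limit 0 0 (by omega), pvGoB_eq_goB2]
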